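-- pv_equiv track=rewrite | github.com/marvel2950/Data-Structures-and-Algorithms-Problems | Level 1/Hashing/Find all symmetric pairs.py | symmetricPairs1
-- ===== SOURCE A (Python) =====
-- def symmetricPairs1(arr):
--     pairs = []
--     for i in range(0,len(arr)):
--         for j in range(i+1,len(arr)):
--             alpha = arr[i][::-1]
--             if alpha==arr[j]:
--                 pairs.append(arr[i])
--     return pairs
-- ===== SOURCE B (Python) =====
-- def symmetricPairs1(arr):
--     # One pass with a counter of the remaining suffix instead of the O(n^2) nested scan.
--     counts = {}
--     for x in arr:
--         t = tuple(x)
--         counts[t] = counts.get(t, 0) + 1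
--     pairs = []
--     for x in arr:
--         t = tuple(x)
--         counts[t] = counts.get(t, 0) - 1
--         k = counts.get(tuple(reversed(x)), 0)
--         pairs.extend([x] * k)
--     return pairs
-- ===== Notes on version B (the rewrite author's own statement) =====
-- stated objective: faster
-- what changed: Replaces A's nested index scan (for each i, scan all j>i for the reversed element) by a single counting pass: build a counter of all elements once, then sweep forward decrementing the counter and emitting each element as many times as its reverse remains in the suffix.
import Mathlib
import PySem

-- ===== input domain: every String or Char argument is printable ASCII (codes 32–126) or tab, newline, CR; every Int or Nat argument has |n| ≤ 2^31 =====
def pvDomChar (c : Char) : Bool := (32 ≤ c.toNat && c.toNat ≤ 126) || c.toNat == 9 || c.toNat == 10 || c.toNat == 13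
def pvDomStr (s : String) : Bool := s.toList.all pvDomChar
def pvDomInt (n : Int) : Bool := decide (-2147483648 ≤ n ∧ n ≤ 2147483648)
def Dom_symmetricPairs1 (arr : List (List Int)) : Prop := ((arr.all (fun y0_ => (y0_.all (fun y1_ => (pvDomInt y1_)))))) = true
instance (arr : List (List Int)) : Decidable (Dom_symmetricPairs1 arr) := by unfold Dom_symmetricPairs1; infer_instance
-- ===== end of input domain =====

-- B replaces A's nested O(n^2·L) scan by one counting pass over a suffix counter (objective: faster).

-- ===== PORT A =====
def symmetricPairs1 (arr : List (List Int)) : List (List Int) :=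
  (PySem.List.pyRange 0 (arr.length : Int) 1).foldl (fun pairs i =>
    (PySem.List.pyRange (i + 1) (arr.length : Int) 1).foldl (fun pairs j =>
      let alpha := (PySem.List.slice? (PySem.List.pyGetD arr i []) none none (-1)).getD []
      if alpha == PySem.List.pyGetD arr j [] then pairs ++ [PySem.List.pyGetD arr i []]
      else pairs) pairs) []

-- ===== PORT B =====
def symmetricPairs1_alt (arr : List (List Int)) : List (List Int) :=
  let counts : PySem.Dict (List Int) Int :=
    arr.foldl (fun d x => d.insert x (d.getD x 0 + 1)) PySem.Dict.empty
  (arr.foldl (fun (st : PySem.Dict (List Int) Int × List (List Int)) x =>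
      let d := st.1.insert x (st.1.getD x 0 - 1)
      let k := d.getD x.reverse 0
      (d, st.2 ++ PySem.List.pyRepeat [x] k)) (counts, [])).2

-- ===== PRECONDITION & SPEC =====
def Spec_symmetricPairs1 (arr : List (List Int)) (out : List (List Int)) : Prop := out = symmetricPairs1_alt arr
instance (arr : List (List Int)) (out : List (List Int)) : Decidable (Spec_symmetricPairs1 arr out) := by unfold Spec_symmetricPairs1; infer_instance

-- ===== CLAIM (what is proved, stated in full; the proofs are below) =====
def Claim_equal_symmetricPairs1 : Prop := ∀ (arr : List (List Int)), Dom_symmetricPairs1 arr → Spec_symmetricPairs1 arr (symmetricPairs1 arr)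

-- ===== LEMMAS AND PROOFS =====

-- Common characterisation: for each element, its reverse's count in the strict suffix, in order.
def specSym : List (List Int) → List (List Int)
  | [] => []
  | x :: rest => List.replicate (rest.count x.reverse) x ++ specSym rest

def repAt (arr : List (List Int)) (k : Nat) : List (List Int) :=
  List.replicate ((arr.drop (k + 1)).count (arr.getD k []).reverse) (arr.getD k [])

lemma map_const_filter (l : List (List Int)) (a c : List Int) :
    (l.filter (fun y => a == y)).map (fun _ => c) = List.replicate (l.count a) c := by
  induction l with
  | nil => rfl
  | cons h t ih =>
    by_cases hh : a = h
    · subst hh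
      simp [List.replicate_succ, ih]
    · simp [Ne.symm hh, beq_iff_eq, hh, ih]

lemma A_eq_flat (arr : List (List Int)) :
    symmetricPairs1 arr = (List.range arr.length).flatMap (repAt arr) := by
  have hstep : ∀ (k : Nat) (acc : List (List Int)),
      (PySem.List.pyRange ((k : Int) + 1) (arr.length : Int) 1).foldl (fun pairs j =>
        let alpha := (PySem.List.slice? (PySem.List.pyGetD arr (k : Int) []) none none (-1)).getD []
        if alpha == PySem.List.pyGetD arr j [] then pairs ++ [PySem.List.pyGetD arr (k : Int) []]
        else pairs) acc = acc ++ repAt arr k := by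
    intro k acc
    have hk1 : ((k : Int) + 1) = ((k + 1 : Nat) : Int) := by push_cast; ring
    rw [hk1, PySem.List.foldl_pyRange_pyGetD' arr []
      (fun pairs y =>
        let alpha := (PySem.List.slice? (PySem.List.pyGetD arr (k : Int) []) none none (-1)).getD []
        if alpha == y then pairs ++ [PySem.List.pyGetD arr (k : Int) []] else pairs)
      acc (by positivity)]
    simp only [PySem.List.slice?_none_none_neg_one, Option.getD_some, Int.toNat_natCast,
      PySem.List.pyGetD_natCast]
    rw [PySem.List.foldl_append_if (fun y => (arr.getD k []).reverse == y)
      (fun _ => arr.getD k [])]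
    rw [map_const_filter]
    rfl
  have hall : ∀ (l : List Nat) (acc : List (List Int)),
      l.foldl (fun (pairs : List (List Int)) (k : Nat) =>
        (PySem.List.pyRange ((k : Int) + 1) (arr.length : Int) 1).foldl (fun pairs j =>
          let alpha := (PySem.List.slice? (PySem.List.pyGetD arr (k : Int) []) none none (-1)).getD []
          if alpha == PySem.List.pyGetD arr j [] then pairs ++ [PySem.List.pyGetD arr (k : Int) []]
          else pairs) pairs) acc = acc ++ l.flatMap (repAt arr) := by
    intro l
    induction l with
    | nil => intro acc; simp
    | cons k t ih =>
      intro acc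
      rw [List.foldl_cons, hstep, ih, List.flatMap_cons, List.append_assoc]
  unfold symmetricPairs1
  rw [show ((arr.length : Int)) = ((arr.length : Nat) : Int) from rfl,
    PySem.List.pyRange_zero_nat, List.foldl_map]
  simpa using hall (List.range arr.length) []

lemma flat_eq_spec (arr : List (List Int)) :
    (List.range arr.length).flatMap (repAt arr) = specSym arr := by
  induction arr with
  | nil => rfl
  | cons x rest ih =>
    rw [List.length_cons, List.range_succ_eq_map, List.flatMap_cons, List.flatMap_map]
    rw [show (fun a => repAt (x :: rest) a.succ) = repAt rest from funext fun a => rfl, ih]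
    rfl

lemma B_loop (rest : List (List Int)) :
    ∀ (d : PySem.Dict (List Int) Int) (acc : List (List Int)),
    (∀ k, d.getD k 0 = (rest.count k : Int)) →
    ((rest.foldl (fun (st : PySem.Dict (List Int) Int × List (List Int)) x =>
        let d := st.1.insert x (st.1.getD x 0 - 1)
        let k := d.getD x.reverse 0
        (d, st.2 ++ PySem.List.pyRepeat [x] k)) (d, acc)).2) = acc ++ specSym rest := by
  induction rest with
  | nil => intro d acc _; simp [specSym]
  | cons x t ih =>
    intro d acc hd
    simp only [List.foldl_cons]
    have hx : (d.insert x (d.getD x 0 - 1)).getD x.reverse 0 = (t.count x.reverse : Int) := by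
      rw [PySem.Dict.getD_insert]
      by_cases h : x.reverse = x
      · rw [if_pos h, hd x, h, List.count_cons, if_pos (by simp)]
        push_cast; ring
      · rw [if_neg h, hd x.reverse, List.count_cons,
          if_neg (by simp [beq_iff_eq]; exact fun e => h e.symm)]
        simp
    have hinv : ∀ k, (d.insert x (d.getD x 0 - 1)).getD k 0 = (t.count k : Int) := by
      intro k
      rw [PySem.Dict.getD_insert]
      by_cases h : k = x
      · subst h
        rw [if_pos rfl, hd k, List.count_cons, if_pos (by simp)]
        push_cast; ring
      · rw [if_neg h, hd k, List.count_cons,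
          if_neg (by simp [beq_iff_eq]; exact fun e => h e.symm)]
        simp
    rw [ih _ _ hinv]
    simp only [hx, specSym, PySem.List.pyRepeat_singleton, Int.toNat_natCast, List.append_assoc]
lemma B_eq_spec (arr : List (List Int)) : symmetricPairs1_alt arr = specSym arr := by
  unfold symmetricPairs1_alt
  rw [B_loop arr _ []]
  · rfl
  · intro k
    rw [PySem.Dict.foldl_insert_getD_add_one_eq_counter, PySem.Dict.getD_counter]

-- ===== VERDICT (by name: the statement is the Claim_ definition above) =====
theorem symmetricPairs1_spec : Claim_equal_symmetricPairs1 := by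
  intro arr _
  unfold Spec_symmetricPairs1
  rw [A_eq_flat, flat_eq_spec, B_eq_spec]
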